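-- pv_equiv track=rewrite | github.com/alexrhogue/advent-of-code | 1/main.py | calc_similarity
-- ===== SOURCE A (Python) =====
-- def calc_similarity(one: list, two: list):
--     two_count = {}
--     for i in range(len(two)):
--         id = two[i]
--         two_count[id] = 1 + two_count.get(id, 0)
--
--
--     similarity = 0
--     for i in range(len(one)):
--         id = one[i]
--         similarity += id * two_count.get(id, 0)
--
--     return similarity
-- ===== SOURCE B (Python) =====
-- def calc_similarity(one: list, two: list):
--     # Two-pointer merge over sorted copies: for each run of equal values v in
--     # sorted(one), advance a pointer in sorted(two) past values < v, count the
--     # run of values == v there, and add v * (run length in one) * (count in two).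
--     a = sorted(one)
--     b = sorted(two)
--     n, m = len(a), len(b)
--     total = 0
--     i = j = 0
--     while i < n:
--         v = a[i]
--         while j < m and b[j] < v:
--             j += 1
--         c = 0
--         while j + c < m and b[j + c] == v:
--             c += 1
--         run = 1
--         while i + run < n and a[i + run] == v:
--             run += 1
--         total += v * c * run
--         i += run
--         j += c
--     return total
-- ===== Notes on version B (the rewrite author's own statement) =====
-- stated objective: alternative
-- what changed: Replaces the hash-counter pass over `two` plus weighted lookup pass over `one` with a sort-then-two-pointer merge: both lists are sorted and walked once in parallel, grouping equal runs and adding v * (run in one) * (run in two).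
import Mathlib
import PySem

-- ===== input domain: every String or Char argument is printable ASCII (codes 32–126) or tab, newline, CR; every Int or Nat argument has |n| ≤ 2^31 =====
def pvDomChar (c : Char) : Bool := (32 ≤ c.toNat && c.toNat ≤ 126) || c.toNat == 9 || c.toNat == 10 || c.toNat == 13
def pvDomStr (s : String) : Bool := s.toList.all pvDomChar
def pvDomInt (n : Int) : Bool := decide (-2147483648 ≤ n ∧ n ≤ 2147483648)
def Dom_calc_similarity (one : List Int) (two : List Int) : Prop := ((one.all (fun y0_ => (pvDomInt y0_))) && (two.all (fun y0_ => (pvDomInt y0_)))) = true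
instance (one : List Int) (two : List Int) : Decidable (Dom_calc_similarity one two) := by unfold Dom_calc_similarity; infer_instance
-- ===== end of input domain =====

-- B sorts copies of both lists and walks them with a two-pointer merge over runs of equal
-- values, instead of A's counter dict built from `two` and looked up along `one`.
-- ===== PORT A =====
def calc_similarity (one : List Int) (two : List Int) : Int :=
  let two_count :=
    (PySem.List.pyRange 0 (PySem.List.len two) 1).foldl
      (fun d i =>
        let id := PySem.List.pyGetD two i 0
        d.insert id (1 + d.getD id 0)) PySem.Dict.empty
  (PySem.List.pyRange 0 (PySem.List.len one) 1).foldl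
      (fun s i =>
        let id := PySem.List.pyGetD one i 0
        s + id * two_count.getD id 0) 0

-- ===== PORT B =====
-- outer `while i < n` loop of Source B as structural recursion on the sorted copy of `one`;
-- the inner index-advancing while loops are the corresponding dropWhile/takeWhile scans.
def simGo : List Int → List Int → Int
  | [], _ => 0
  | v :: rest, b =>
    let b' := b.dropWhile (fun y => y < v)
    let c := (b'.takeWhile (fun y => y == v)).length
    let run := 1 + (rest.takeWhile (fun y => y == v)).length
    v * c * run + simGo (rest.dropWhile (fun y => y == v)) (b'.drop c)
termination_by a _ => a.length
decreasing_by
  simp only [List.length_cons]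
  exact Nat.lt_succ_of_le (List.length_dropWhile_le _ _)

def calc_similarity_alt (one : List Int) (two : List Int) : Int :=
  simGo (PySem.List.sorted one (fun x => x) false) (PySem.List.sorted two (fun x => x) false)

-- ===== PRECONDITION & SPEC =====
def Spec_calc_similarity (one : List Int) (two : List Int) (out : Int) : Prop := out = calc_similarity_alt one two
instance (one : List Int) (two : List Int) (out : Int) : Decidable (Spec_calc_similarity one two out) := by unfold Spec_calc_similarity; infer_instance

-- ===== CLAIM (what is proved, stated in full; the proofs are below) =====
def Claim_equal_calc_similarity : Prop := ∀ (one : List Int) (two : List Int), Dom_calc_similarity one two → Spec_calc_similarity one two (calc_similarity one two)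

-- ===== LEMMAS AND PROOFS =====

-- dropping a prefix whose elements never equal v preserves the count of v
lemma count_dropWhile_ne {p : Int → Bool} (l : List Int) (v : Int)
    (h : ∀ x, p x = true → x ≠ v) : (l.dropWhile p).count v = l.count v := by
  induction l with
  | nil => simp
  | cons y t ih =>
    by_cases hy : p y = true
    · rw [List.dropWhile_cons_of_pos hy, ih, List.count_cons_of_ne (h y hy)]
    · rw [List.dropWhile_cons_of_neg hy]

-- every survivor of dropWhile (· < v) on a sorted list is ≥ v
lemma ge_of_dropWhile_lt (b : List Int) (v : Int) (hb : b.Pairwise (· ≤ ·)) :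
    ∀ x ∈ b.dropWhile (fun y => decide (y < v)), v ≤ x := by
  induction b with
  | nil => simp
  | cons y t ih =>
    by_cases hy : y < v
    · rw [List.dropWhile_cons_of_pos (by simpa using hy)]
      exact ih hb.of_cons
    · rw [List.dropWhile_cons_of_neg (by simpa using hy)]
      intro x hx
      rcases List.mem_cons.mp hx with rfl | hx
      · omega
      · have := (List.pairwise_cons.mp hb).1 x hx; omega

-- every survivor of dropWhile (· == v) on a sorted list of elements ≥ v is > v
lemma gt_of_dropWhile_eq (l : List Int) (v : Int) (hl : l.Pairwise (· ≤ ·))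
    (hge : ∀ x ∈ l, v ≤ x) :
    ∀ x ∈ l.dropWhile (fun y => y == v), v < x := by
  induction l with
  | nil => simp
  | cons y t ih =>
    by_cases hy : y = v
    · rw [List.dropWhile_cons_of_pos (by simpa using hy)]
      exact ih hl.of_cons (fun x hx => hge x (List.mem_cons_of_mem _ hx))
    · rw [List.dropWhile_cons_of_neg (by simpa using hy)]
      intro x hx
      have hyv : v ≤ y := hge y List.mem_cons_self
      rcases List.mem_cons.mp hx with rfl | hx
      · omega
      · have := (List.pairwise_cons.mp hl).1 x hx; omega

lemma drop_length_takeWhile (p : Int → Bool) (l : List Int) :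
    l.drop (l.takeWhile p).length = l.dropWhile p := by
  induction l with
  | nil => simp
  | cons y t ih =>
    by_cases hy : p y = true
    · rw [List.takeWhile_cons_of_pos hy, List.dropWhile_cons_of_pos hy, List.length_cons,
        List.drop_succ_cons, ih]
    · rw [List.takeWhile_cons_of_neg hy, List.dropWhile_cons_of_neg hy, List.length_nil,
        List.drop_zero]

-- count of v in a sorted list of elements ≥ v is the length of its (· == v) prefix
lemma count_eq_takeWhile_length (l : List Int) (v : Int) (hl : l.Pairwise (· ≤ ·))
    (hge : ∀ x ∈ l, v ≤ x) :
    (l.count v : Int) = ((l.takeWhile (fun y => y == v)).length : Int) := by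
  have hsplit := List.takeWhile_append_dropWhile (p := fun y => y == v) (l := l)
  have h0 : (l.dropWhile (fun y => y == v)).count v = 0 := by
    refine List.count_eq_zero.mpr (fun h => ?_)
    exact absurd rfl (Int.ne_of_gt (gt_of_dropWhile_eq l v hl hge v h)).symm
  have hT : (l.takeWhile (fun y => y == v)).count v
      = (l.takeWhile (fun y => y == v)).length := by
    refine List.count_eq_length.mpr (fun x hx => ?_)
    have := List.mem_takeWhile_imp hx
    simpa using (by simpa using this : x = v).symm
  calc (l.count v : Int)
      = (((l.takeWhile (fun y => y == v)) ++ (l.dropWhile (fun y => y == v))).count v : Int) := by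
        rw [hsplit]
    _ = ((l.takeWhile (fun y => y == v)).length : Int) := by
        rw [List.count_append, h0, hT]; simp

-- sum of a map whose value is constant on the list
lemma sum_map_const_on (l : List Int) (f : Int → Int) (k : Int)
    (h : ∀ x ∈ l, f x = k) : (l.map f).sum = l.length * k := by
  induction l with
  | nil => simp
  | cons y t ih =>
    simp only [List.map_cons, List.sum_cons, List.length_cons]
    rw [h y List.mem_cons_self, ih (fun x hx => h x (List.mem_cons_of_mem _ hx))]
    push_cast; ring

-- the merge computes the weighted-count sum, for sorted inputs
lemma simGo_eq (N : ℕ) : ∀ (a b : List Int), a.length ≤ N →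
    a.Pairwise (· ≤ ·) → b.Pairwise (· ≤ ·) →
    simGo a b = (a.map (fun x => x * (b.count x : Int))).sum := by
  induction N with
  | zero =>
    intro a b hlen _ _
    have : a = [] := List.eq_nil_of_length_eq_zero (Nat.le_zero.mp hlen)
    subst this; simp [simGo]
  | succ N ih =>
    intro a b hlen ha hb
    match a with
    | [] => simp [simGo]
    | v :: rest =>
      rw [simGo]
      set b' := b.dropWhile (fun y => y < v) with hb'
      set T := rest.takeWhile (fun y => y == v) with hT
      set R := rest.dropWhile (fun y => y == v) with hR
      have hrest_ge : ∀ x ∈ rest, v ≤ x := (List.pairwise_cons.mp ha).1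
      have hrest_sorted : rest.Pairwise (· ≤ ·) := (List.pairwise_cons.mp ha).2
      have hb'_sorted : b'.Pairwise (· ≤ ·) := hb.sublist (List.dropWhile_sublist _)
      have hb'_ge : ∀ x ∈ b', v ≤ x := ge_of_dropWhile_lt b v hb
      have hR_sorted : R.Pairwise (· ≤ ·) := hrest_sorted.sublist (List.dropWhile_sublist _)
      have hR_gt : ∀ x ∈ R, v < x := gt_of_dropWhile_eq rest v hrest_sorted hrest_ge
      -- counts survive both dropped prefixes, for targets > v (and = v for the first pass)
      have hcount_b' : ∀ x, v ≤ x → b'.count x = b.count x := by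
        intro x hx
        exact count_dropWhile_ne b x (fun y hy => by simp at hy; omega)
      -- b'.drop c = dropWhile (== v) b'
      have hdrop : b'.drop (b'.takeWhile (fun y => y == v)).length
          = b'.dropWhile (fun y => y == v) := drop_length_takeWhile _ _
      have hcount_b'' : ∀ x, v < x →
          ((b'.drop (b'.takeWhile (fun y => y == v)).length).count x : Int) = (b.count x : Int) := by
        intro x hx
        rw [hdrop, count_dropWhile_ne b' x (fun y hy => by simp at hy; omega),
          hcount_b' x (le_of_lt hx)]
      have hb''_sorted : (b'.drop (b'.takeWhile (fun y => y == v)).length).Pairwise (· ≤ ·) :=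
        hb'_sorted.sublist (List.drop_sublist _ _)
      -- c as a count
      have hc : ((b'.takeWhile (fun y => y == v)).length : Int) = (b.count v : Int) := by
        rw [← count_eq_takeWhile_length b' v hb'_sorted hb'_ge, hcount_b' v le_rfl]
      -- recursive call via ih
      have hRlen : R.length ≤ N := by
        have h1 : R.length ≤ rest.length := List.length_dropWhile_le _ _
        have h2 : rest.length ≤ N := by simpa using Nat.succ_le_succ_iff.mp (by simpa using hlen)
        omega
      rw [ih R _ hRlen hR_sorted hb''_sorted]
      -- rewrite the recursive sum's counts from b'' to b
      have hsumR : (R.map (fun x => x * ((b'.drop (b'.takeWhile (fun y => y == v)).length).count x : Int))).sum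
          = (R.map (fun x => x * (b.count x : Int))).sum := by
        apply congrArg
        exact List.map_congr_left (fun x hx => by rw [hcount_b'' x (hR_gt x hx)])
      rw [hsumR]
      -- decompose the target sum over v :: (T ++ R)
      have hrest_split : rest = T ++ R := (List.takeWhile_append_dropWhile).symm
      have hT_all : ∀ x ∈ T, x = v := fun x hx => by
        simpa using List.mem_takeWhile_imp hx
      have hsumT : (T.map (fun x => x * (b.count x : Int))).sum
          = (T.length : Int) * (v * (b.count v : Int)) :=
        sum_map_const_on T _ _ (fun x hx => by rw [hT_all x hx])
      calc v * ((b'.takeWhile (fun y => y == v)).length : Int)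
              * (1 + ((rest.takeWhile (fun y => y == v)).length : Int))
            + (R.map (fun x => x * (b.count x : Int))).sum
          = v * (b.count v : Int) * (1 + (T.length : Int))
            + (R.map (fun x => x * (b.count x : Int))).sum := by rw [hc, ← hT]
        _ = v * (b.count v : Int)
            + ((T.length : Int) * (v * (b.count v : Int))
              + (R.map (fun x => x * (b.count x : Int))).sum) := by ring
        _ = (((v :: rest).map (fun x => x * (b.count x : Int))).sum) := by
            rw [hrest_split]
            simp only [List.map_cons, List.sum_cons, List.map_append, List.sum_append, hsumT]

-- ===== VERDICT (by name: the statement is the Claim_ definition above) =====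
theorem calc_similarity_spec : Claim_equal_calc_similarity := by
  intro one two _
  unfold Spec_calc_similarity calc_similarity calc_similarity_alt
  simp only [PySem.List.len_eq]
  rw [show (List.foldl (fun (d : PySem.Dict Int Int) i => d.insert (PySem.List.pyGetD two i 0) (1 + d.getD (PySem.List.pyGetD two i 0) 0)) PySem.Dict.empty (PySem.List.pyRange 0 (two.length : Int) 1))
        = two.foldl (fun d x => d.insert x (1 + d.getD x 0)) PySem.Dict.empty
      from PySem.List.foldl_pyRange_zero_pyGetD' two 0 (fun (d : PySem.Dict Int Int) x => d.insert x (1 + d.getD x 0)) PySem.Dict.empty]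
  rw [show (List.foldl (fun (s : Int) i => s + PySem.List.pyGetD one i 0 * (two.foldl (fun d x => d.insert x (1 + d.getD x 0)) PySem.Dict.empty).getD (PySem.List.pyGetD one i 0) 0) 0 (PySem.List.pyRange 0 (one.length : Int) 1))
        = one.foldl (fun s x => s + x * (two.foldl (fun d x => d.insert x (1 + d.getD x 0)) PySem.Dict.empty).getD x 0) 0
      from PySem.List.foldl_pyRange_zero_pyGetD' one 0 (fun s x => s + x * (two.foldl (fun d x => d.insert x (1 + d.getD x 0)) PySem.Dict.empty).getD x 0) 0]
  have hcnt : ∀ v : Int,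
      (two.foldl (fun d x => d.insert x (1 + d.getD x 0)) PySem.Dict.empty).getD v 0
        = (two.count v : Int) := by
    intro v
    have h2 : (two.foldl (fun (d : PySem.Dict Int Int) x => d.insert x (d.getD x 0 + 1)) PySem.Dict.empty) =
        two.foldl (fun (d : PySem.Dict Int Int) x => d.insert x (1 + d.getD x 0)) PySem.Dict.empty := by
      congr 1; funext d x; rw [Int.add_comm]
    rw [← h2, PySem.Dict.getD_foldl_insert_add_one]
    simp [PySem.Dict.getD, PySem.Dict.get?, PySem.Dict.empty]
  have hsum : ∀ (l : List Int) (f : Int → Int) (a : Int),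
      l.foldl (fun s id => s + id * f id) a = a + (l.map (fun id => id * f id)).sum := by
    intro l f
    induction l with
    | nil => simp
    | cons y t ih => intro a; simp [ih, Int.add_assoc]
  simp only [hcnt, hsum]
  rw [Int.zero_add]
  -- A = Σ_{x∈one} x * count two x; now move to the sorted lists
  have hpa := PySem.List.sorted_perm (xs := one) (key := fun x => x) (rev := false)
  have hpb := PySem.List.sorted_perm (xs := two) (key := fun x => x) (rev := false)
  have hsa : (PySem.List.sorted one (fun x => x) false).Pairwise (· ≤ ·) :=
    PySem.List.sorted_pairwise one (fun x => x)
  have hsb : (PySem.List.sorted two (fun x => x) false).Pairwise (· ≤ ·) :=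
    PySem.List.sorted_pairwise two (fun x => x)
  rw [simGo_eq (PySem.List.sorted one (fun x => x) false).length _ _ le_rfl hsa hsb]
  calc (one.map (fun id => id * (two.count id : Int))).sum
      = ((PySem.List.sorted one (fun x => x) false).map (fun id => id * (two.count id : Int))).sum :=
        ((hpa.map _).sum_eq).symm
    _ = ((PySem.List.sorted one (fun x => x) false).map
          (fun x => x * ((PySem.List.sorted two (fun x => x) false).count x : Int))).sum := by
        apply congrArg
        exact List.map_congr_left (fun x _ => by rw [hpb.count_eq])
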